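-- pv_equiv track=rewrite | github.com/YuuKenx/numero_espanol | numero_espanol/procesadores/centenas.py | procesar_centenas
-- ===== SOURCE A (Python) =====
-- def procesar_centenas(texto):
--     """
--     Procesa las centenas (100-999) en un texto en español y devuelve su valor numérico.
--
--     Args:
--         texto (str): Texto que contiene números en español
--
--     Returns:
--         int: Valor numérico de la centena encontrada, o 0 si no se encuentra
--     """
--     centenas = {
--         "cien": 100, "ciento": 100,
--         "doscientos": 200, "doscientas": 200,
--         "trescientos": 300, "trescientas": 300,
--         "cuatrocientos": 400, "cuatrocientas": 400,
--         "quinientos": 500, "quinientas": 500,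
--         "seiscientos": 600, "seiscientas": 600,
--         "setecientos": 700, "setecientas": 700,
--         "ochocientos": 800, "ochocientas": 800,
--         "novecientos": 900, "novecientas": 900
--     }
--
--     texto = texto.lower()
--     palabras = texto.split()
--
--     for palabra, valor in centenas.items():
--         if palabra in palabras:
--             # Caso especial para "cien" vs "ciento"
--             if palabra == "cien" and "ciento" not in texto:
--                 return 100
--             elif palabra == "ciento" or palabra == "cien":
--                 # Si es "ciento" seguido de algo, es 100 + ese algo
--                 return 100
--             else:
--                 return valor
--
--     return 0  # Si no se encuentra ninguna centena
-- ===== SOURCE B (Python) =====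
-- def procesar_centenas(texto):
--     """One-pass re-implementation: scan the words once, look each word up in the
--     dict, and keep the smallest matching value (the dict's values are ascending,
--     so the smallest match equals the first-in-dict-order match of the original)."""
--     centenas = {
--         "cien": 100, "ciento": 100,
--         "doscientos": 200, "doscientas": 200,
--         "trescientos": 300, "trescientas": 300,
--         "cuatrocientos": 400, "cuatrocientas": 400,
--         "quinientos": 500, "quinientas": 500,
--         "seiscientos": 600, "seiscientas": 600,
--         "setecientos": 700, "setecientas": 700,
--         "ochocientos": 800, "ochocientas": 800,
--         "novecientos": 900, "novecientas": 900
--     }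
--     best = None
--     for palabra in texto.lower().split():
--         valor = centenas.get(palabra)
--         if valor is not None and (best is None or valor < best):
--             best = valor
--     return best if best is not None else 0
-- ===== Notes on version B (the rewrite author's own statement) =====
-- stated objective: simpler
-- what changed: A loops over the 18 dict entries testing membership of each key in the word list (with redundant cien/ciento special cases); B makes a single pass over the words of the text, looks each word up in the dict, and keeps the running minimum matching value, which equals A's first-in-dict-order match because the dict's values are ascending.
import Mathlib
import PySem

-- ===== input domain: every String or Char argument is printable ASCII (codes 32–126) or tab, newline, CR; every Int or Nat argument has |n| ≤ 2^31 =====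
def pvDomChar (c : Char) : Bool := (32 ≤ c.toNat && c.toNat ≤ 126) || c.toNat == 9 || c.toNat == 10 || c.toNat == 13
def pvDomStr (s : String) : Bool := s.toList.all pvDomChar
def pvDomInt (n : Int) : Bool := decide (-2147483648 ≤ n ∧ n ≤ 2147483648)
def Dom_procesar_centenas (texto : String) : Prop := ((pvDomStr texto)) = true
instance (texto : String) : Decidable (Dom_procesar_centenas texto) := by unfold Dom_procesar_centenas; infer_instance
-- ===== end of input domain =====

-- B replaces A's loop over the 18 dict entries (membership test per entry, redundant
-- cien/ciento special cases) by one pass over the words keeping the minimum matched value.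

-- the centenas dict, shared literal content of both programs
def centList : List (String × Int) :=
  [("cien", 100), ("ciento", 100),
   ("doscientos", 200), ("doscientas", 200),
   ("trescientos", 300), ("trescientas", 300),
   ("cuatrocientos", 400), ("cuatrocientas", 400),
   ("quinientos", 500), ("quinientas", 500),
   ("seiscientos", 600), ("seiscientas", 600),
   ("setecientos", 700), ("setecientas", 700),
   ("ochocientos", 800), ("ochocientas", 800),
   ("novecientos", 900), ("novecientas", 900)]

-- ===== PORT A =====
-- A's for-loop over centenas.items() with early return, step for step
def goA (ws : List String) (t : String) : List (String × Int) → Int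
  | [] => 0
  | (k, v) :: rest =>
      if ws.contains k then
        if k == "cien" && !(PySem.Str.isIn "ciento" t) then 100
        else if k == "ciento" || k == "cien" then 100
        else v
      else goA ws t rest

def procesar_centenas (texto : String) : Int :=
  let t := PySem.Str.lower texto
  let palabras := PySem.Str.split₀ t
  goA palabras t centList

-- ===== PORT B =====
def centDict : PySem.Dict String Int := PySem.Dict.ofList centList

def procesar_centenas_alt (texto : String) : Int :=
  let best :=
    (PySem.Str.split₀ (PySem.Str.lower texto)).foldl
      (fun best palabra =>
        match centDict.get? palabra with
        | none => best
        | some valor =>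
            match best with
            | none => some valor
            | some b => if valor < b then some valor else some b)
      none
  match best with
  | some b => b
  | none => 0

-- ===== PRECONDITION & SPEC =====
def Spec_procesar_centenas (texto : String) (out : Int) : Prop := out = procesar_centenas_alt texto
instance (texto : String) (out : Int) : Decidable (Spec_procesar_centenas texto out) := by unfold Spec_procesar_centenas; infer_instance

-- ===== CLAIM (what is proved, stated in full; the proofs are below) =====
def Claim_equal_procesar_centenas : Prop := ∀ (texto : String), Dom_procesar_centenas texto → Spec_procesar_centenas texto (procesar_centenas texto)

-- ===== LEMMAS AND PROOFS =====

-- A's loop returns the value of the FIRST dict entry whose key occurs among the words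
-- (both cien/ciento special branches return that entry's own value, 100).
lemma goA_eq_find_gen (ws : List String) (t : String) :
    ∀ L : List (String × Int), (∀ p ∈ L, (p.1 = "cien" ∨ p.1 = "ciento") → p.2 = 100) →
      goA ws t L = ((L.find? (fun p => ws.contains p.1)).map Prod.snd).getD 0
  | [], _ => rfl
  | (k, v) :: rest, h => by
      have hv : (k = "cien" ∨ k = "ciento") → v = 100 := h (k, v) (List.mem_cons_self ..)
      have htail := goA_eq_find_gen ws t rest (fun p hp hk => h p (List.mem_cons_of_mem _ hp) hk)
      by_cases hc : ws.contains k = true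
      · rw [List.find?_cons_of_pos (by simpa using hc)]
        simp only [goA, hc, if_true, Option.map_some, Option.getD_some]
        by_cases hk1 : k = "cien"
        · simp [hk1, hv (Or.inl hk1)]
        · by_cases hk2 : k = "ciento"
          · simp [hk2, hv (Or.inr hk2)]
          · simp [hk1, hk2]
      · rw [List.find?_cons_of_neg (by simpa using hc)]
        have hc' : ¬ k ∈ ws := by simpa using hc
        simpa [goA, hc'] using htail

lemma goA_eq_find (ws : List String) (t : String) :
    goA ws t centList = ((centList.find? (fun p => ws.contains p.1)).map Prod.snd).getD 0 :=
  goA_eq_find_gen ws t centList (by decide)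

-- B's matched-value list
def matched (ws : List String) : List Int := ws.filterMap (fun w => centDict.get? w)

lemma step_eq (best : Option Int) (w : String) :
    (match centDict.get? w with
      | none => best
      | some valor =>
          match best with
          | none => some valor
          | some b => if valor < b then some valor else some b) =
    (match centDict.get? w with
      | none => best
      | some valor => some (min (best.getD valor) valor)) := by
  cases h : centDict.get? w with
  | none => rfl
  | some v =>
      cases best with
      | none => simp
      | some b => simp only [Option.getD_some, min_def]; split_ifs <;> first | rfl | (exfalso; omega)

lemma fold_filterMap (ws : List String) (best : Option Int) :
    ws.foldl
      (fun best palabra =>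
        match centDict.get? palabra with
        | none => best
        | some valor =>
            match best with
            | none => some valor
            | some b => if valor < b then some valor else some b)
      best =
    (matched ws).foldl (fun o v => some (min (o.getD v) v)) best := by
  induction ws generalizing best with
  | nil => rfl
  | cons w ws ih =>
      simp only [matched, List.foldl_cons, List.filterMap_cons]
      rw [step_eq]
      cases h : centDict.get? w <;> simp [matched, ih]

lemma fold_min (vs : List Int) :
    vs.foldl (fun o v => some (min (o.getD v) v)) none = vs.min? := by
  cases vs with
  | nil => rfl
  | cons a l =>
      simp only [List.min?]
      suffices h : ∀ (l : List Int) (a : Int),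
          l.foldl (fun o v => some (min (o.getD v) v)) (some a) = some (l.foldl min a) by
        simpa using h l a
      intro l
      induction l with
      | nil => intro a; rfl
      | cons b l ih => intro a; simp [ih]

-- membership transfer between the two scan orders
lemma items_centDict : centDict.items = centList := by decide

lemma nodup_keys_centDict : centDict.keys.Nodup := by decide

lemma get?_centDict_iff (w : String) (v : Int) :
    centDict.get? w = some v ↔ (w, v) ∈ centList := by
  rw [PySem.Dict.get?_eq_some_iff_mem_items centDict w v nodup_keys_centDict, items_centDict]

lemma mem_matched_iff (ws : List String) (v : Int) :
    v ∈ matched ws ↔ v ∈ (centList.filter (fun p => ws.contains p.1)).map Prod.snd := by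
  simp only [matched, List.mem_filterMap, List.mem_map, List.mem_filter]
  constructor
  · rintro ⟨w, hw, hv⟩
    exact ⟨(w, v), ⟨(get?_centDict_iff w v).mp hv, by simpa using List.elem_iff.mpr hw⟩, rfl⟩
  · rintro ⟨⟨k, v'⟩, ⟨hk, hc⟩, rfl⟩
    exact ⟨k, by simpa using hc, (get?_centDict_iff k v').mpr hk⟩

-- the filtered value list inherits the dict's ascending order
lemma filtered_sorted (ws : List String) :
    ((centList.filter (fun p => ws.contains p.1)).map Prod.snd).Pairwise (· ≤ ·) := by
  refine List.Pairwise.map _ (fun a b h => h) ?_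
  refine List.Pairwise.filter _ ?_
  simp only [centList]
  decide

theorem procesar_centenas_spec : Claim_equal_procesar_centenas := by
  unfold Claim_equal_procesar_centenas
  intro texto _
  unfold Spec_procesar_centenas procesar_centenas procesar_centenas_alt
  rw [fold_filterMap, fold_min, goA_eq_find]
  set ws := PySem.Str.split₀ (PySem.Str.lower texto) with hws
  set F := (centList.filter (fun p => ws.contains p.1)).map Prod.snd with hF
  have hfind : (centList.find? (fun p => ws.contains p.1)).map Prod.snd = F.head? := by
    rw [hF, List.head?_map, List.head?_filter]
  rw [hfind]
  cases hM : (matched ws).min? with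
  | none =>
      rw [List.min?_eq_none_iff] at hM
      have : F = [] := by
        rw [List.eq_nil_iff_forall_not_mem]
        intro v hv
        rw [← mem_matched_iff] at hv
        simp [hM] at hv
      simp [this]
  | some m =>
      obtain ⟨hmem, hle⟩ := List.min?_eq_some_iff.mp hM
      have hmF : m ∈ F := (mem_matched_iff ws m).mp hmem
      cases hFc : F with
      | nil => rw [hFc] at hmF; simp at hmF
      | cons h F' =>
          rw [hFc] at hmF
          have hhm : h ≤ m := by
            have hp := filtered_sorted ws
            rw [← hF, hFc] at hp
            rcases List.mem_cons.mp hmF with rfl | hmem'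
            · exact le_refl m
            · exact (List.pairwise_cons.mp hp).1 m hmem'
          have hmh : m ≤ h := hle h ((mem_matched_iff ws h).mpr (by rw [← hF, hFc]; exact List.mem_cons_self ..))
          have : m = h := le_antisymm hmh hhm
          simp [this]
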